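-- pv_equiv track=rewrite | github.com/PedroBadii/pruebaGitHub | listas/ordenar_valores.py | tercer_impar
-- ===== SOURCE A (Python) =====
-- def tercer_impar(lista): #toma una lista y devuelve otra igual hasta el tercer impar inclusive
--     lista_impares = []
--     cant_impar = 0
--     i = 0
--     while cant_impar < 3 and i<len(lista):
--         lista_impares.append(lista[i])
--         if lista[i] % 2 != 0:
--             cant_impar += 1
--         i += 1
--     return lista_impares
-- ===== SOURCE B (Python) =====
-- def tercer_impar(lista):
--     # phase 1: find the cut point (index after the third odd), phase 2: one slice
--     cutoff = len(lista)
--     cant = 0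
--     for i, x in enumerate(lista):
--         if x % 2 != 0:
--             cant += 1
--             if cant == 3:
--                 cutoff = i + 1
--                 break
--     return lista[:cutoff]
-- ===== Notes on version B (the rewrite author's own statement) =====
-- stated objective: simpler
-- what changed: B separates locating the cut point (first scan counting odds, stopping at the third) from producing the copy (a single slice), instead of A's while loop that appends element by element while counting.
import Mathlib
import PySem

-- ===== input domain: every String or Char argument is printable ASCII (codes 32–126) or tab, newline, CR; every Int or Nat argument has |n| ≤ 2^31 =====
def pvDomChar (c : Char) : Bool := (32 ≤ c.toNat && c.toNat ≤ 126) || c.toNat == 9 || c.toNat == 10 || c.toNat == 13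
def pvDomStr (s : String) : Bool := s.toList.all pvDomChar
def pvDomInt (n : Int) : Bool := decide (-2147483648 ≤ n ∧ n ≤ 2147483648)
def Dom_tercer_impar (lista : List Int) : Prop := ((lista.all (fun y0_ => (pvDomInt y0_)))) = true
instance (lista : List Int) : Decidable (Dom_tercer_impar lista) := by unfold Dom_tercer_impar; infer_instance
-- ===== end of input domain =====

-- B locates the cut point (first scan counting odds) and returns one slice, instead of A's append-as-you-go while loop; objective: simpler decomposition.


-- ===== PORT A =====
-- while cant_impar < 3 and i < len(lista): append lista[i]; count odds; i += 1
def tercerImparGo : List Int → Int → List Int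
  | [], _ => []
  | x :: xs, cant =>
    if cant < 3 then
      x :: tercerImparGo xs (if PySem.Int.mod x 2 ≠ 0 then cant + 1 else cant)
    else []

def tercer_impar (lista : List Int) : List Int := tercerImparGo lista 0

-- ===== PORT B =====
-- phase 1 of Source B: scan with enumerate, return some (i+1) at the third odd, none if fewer than 3 odds
def tercerImparCut : List Int → Int → Nat → Option Nat
  | [], _, _ => none
  | x :: xs, cant, i =>
    if PySem.Int.mod x 2 ≠ 0 then
      if cant + 1 = 3 then some (i + 1) else tercerImparCut xs (cant + 1) (i + 1)
    else tercerImparCut xs cant (i + 1)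

-- lista[:cutoff] with 0 ≤ cutoff ≤ len(lista) is exactly List.take
def tercer_impar_alt (lista : List Int) : List Int :=
  let cutoff := match tercerImparCut lista 0 0 with
    | some k => k
    | none => lista.length
  lista.take cutoff

-- ===== PRECONDITION & SPEC =====
def Spec_tercer_impar (lista : List Int) (out : List Int) : Prop := out = tercer_impar_alt lista
instance (lista : List Int) (out : List Int) : Decidable (Spec_tercer_impar lista out) := by unfold Spec_tercer_impar; infer_instance

-- ===== CLAIM (what is proved, stated in full; the proofs are below) =====
def Claim_equal_tercer_impar : Prop := ∀ (lista : List Int), Dom_tercer_impar lista → Spec_tercer_impar lista (tercer_impar lista)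

-- ===== LEMMAS AND PROOFS =====
lemma tercerImparCut_shift (xs : List Int) : ∀ (c : Int) (i : Nat),
    tercerImparCut xs c i = (tercerImparCut xs c 0).map (· + i) := by
  induction xs with
  | nil => intro c i; simp [tercerImparCut]
  | cons x xs ih =>
    intro c i
    simp only [tercerImparCut]
    split_ifs with h1 h2
    · simp [Nat.add_comm]
    · rw [ih (c + 1) (i + 1), ih (c + 1) 1]
      cases tercerImparCut xs (c + 1) 0 <;> simp <;> omega
    · rw [ih c (i + 1), ih c 1]
      cases tercerImparCut xs c 0 <;> simp <;> omega

lemma tercerImparGo_ge_three (xs : List Int) (c : Int) (h : ¬ c < 3) :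
    tercerImparGo xs c = [] := by
  cases xs <;> simp [tercerImparGo, h]

lemma tercerImpar_main (xs : List Int) : ∀ (c : Int), c < 3 →
    tercerImparGo xs c =
      xs.take (match tercerImparCut xs c 0 with
        | some k => k
        | none => xs.length) := by
  induction xs with
  | nil => intro c _; simp [tercerImparGo, tercerImparCut]
  | cons x xs ih =>
    intro c hc
    simp only [tercerImparGo, tercerImparCut, if_pos hc]
    split_ifs with h1 h2
    · -- third odd found: cutoff = 1
      rw [tercerImparGo_ge_three xs (c + 1) (by omega)]
      simp [h2]
    · -- odd, not yet third
      rw [ih (c + 1) (by omega), tercerImparCut_shift xs (c + 1) 1]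
      cases tercerImparCut xs (c + 1) 0 <;> simp
    · -- even
      rw [ih c hc, tercerImparCut_shift xs c 1]
      cases tercerImparCut xs c 0 <;> simp

-- ===== VERDICT (by name: the statement is the Claim_ definition above) =====
theorem tercer_impar_spec : Claim_equal_tercer_impar := by
  intro lista _
  unfold Spec_tercer_impar tercer_impar tercer_impar_alt
  exact tercerImpar_main lista 0 (by omega)
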